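-- pv_equiv track=rewrite | github.com/ChestnutMongrel/advent-of-code | y2017/21_millisecond.py | rotate_and_flip
-- ===== SOURCE A (Python) =====
-- def rotate_and_flip(pattern: str) -> str:
--     pattern = pattern.split('/')
--     size = len(pattern)
--     for _ in range(4):
--         new_pattern = list()
--         for i in range(size):
--             new_pattern.append(''.join(pattern[ii][i] for ii in reversed(range(size))))
--         yield ''.join(new_pattern)
--         yield ''.join(reversed(new_pattern))
--         pattern = new_pattern
-- ===== SOURCE B (Python) =====
-- def rotate_and_flip(pattern: str):
--     m = pattern.split('/')
--     n = len(m)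
--     for k in (1, 2, 3, 0):
--         if k == 1:
--             rows = [''.join(m[n - 1 - j][i] for j in range(n)) for i in range(n)]
--         elif k == 2:
--             rows = [''.join(m[n - 1 - i][n - 1 - j] for j in range(n)) for i in range(n)]
--         elif k == 3:
--             rows = [''.join(m[j][n - 1 - i] for j in range(n)) for i in range(n)]
--         else:
--             rows = [''.join(m[i][j] for j in range(n)) for i in range(n)]
--         yield ''.join(rows)
--         yield ''.join(reversed(rows))
-- ===== Notes on version B (the rewrite author's own statement) =====
-- stated objective: idiomatic
-- what changed: A rebuilds each orientation cumulatively (each rotation computed from the previous one inside a 4-iteration loop); B computes all four rotations directly from the original matrix with explicit coordinate index formulas and yields them in the same order.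
-- outside the precondition, e.g. on rotate_and_flip('/'): A raises IndexError, B raises IndexError
import Mathlib
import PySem

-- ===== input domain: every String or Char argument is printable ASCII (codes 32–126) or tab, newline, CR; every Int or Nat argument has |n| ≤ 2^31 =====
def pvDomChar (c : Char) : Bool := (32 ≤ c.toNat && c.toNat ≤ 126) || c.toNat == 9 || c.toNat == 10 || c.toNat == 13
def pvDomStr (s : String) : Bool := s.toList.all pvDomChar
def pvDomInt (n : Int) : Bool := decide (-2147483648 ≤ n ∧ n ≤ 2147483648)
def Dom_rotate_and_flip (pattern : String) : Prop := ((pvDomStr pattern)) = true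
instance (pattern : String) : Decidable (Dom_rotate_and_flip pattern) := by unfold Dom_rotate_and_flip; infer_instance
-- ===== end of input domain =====

-- B computes each orientation directly from the original matrix by coordinate index formulas
-- instead of A's cumulative rotation loop; same output order (objective: idiomatic).

-- ===== PORT A =====
-- one pass of A's inner loop: new_pattern built column-by-column from the previous pattern
def pvRotOnce (size : Nat) (pat : List (List Char)) : List (List Char) :=
  (List.range size).map (fun i =>
    ((List.range size).reverse).map (fun ii => (pat.getD ii []).getD i ' '))

def rotate_and_flip (pattern : String) : List String :=
  ((PySem.List.pyRange 0 4 1).foldl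
    (fun (st : List (List Char) × List String) _ =>
      let np := pvRotOnce (PySem.Chars.splitOn pattern.toList ['/']).length st.1
      (np, st.2 ++ [String.ofList np.flatten, String.ofList np.reverse.flatten]))
    (PySem.Chars.splitOn pattern.toList ['/'], ([] : List String))).2

-- ===== PORT B =====
-- m[r][c] (in range whenever Pre_ holds and r, c < n)
def pvCell (m : List (List Char)) (r c : Nat) : Char := (m.getD r []).getD c ' '

-- the n×n matrix whose (i,j) entry is f i j (B's row comprehension)
def pvMtx (n : Nat) (f : Nat → Nat → Char) : List (List Char) :=
  (List.range n).map (fun i => (List.range n).map (fun j => f i j))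

-- 'yield joined rows; yield joined reversed rows'
def pvYieldPair (rows : List (List Char)) : List String :=
  [String.ofList rows.flatten, String.ofList rows.reverse.flatten]

def rotate_and_flip_alt (pattern : String) : List String :=
  pvYieldPair (pvMtx (PySem.Chars.splitOn pattern.toList ['/']).length
    (fun i j => pvCell (PySem.Chars.splitOn pattern.toList ['/'])
      ((PySem.Chars.splitOn pattern.toList ['/']).length - 1 - j) i)) ++
  pvYieldPair (pvMtx (PySem.Chars.splitOn pattern.toList ['/']).length
    (fun i j => pvCell (PySem.Chars.splitOn pattern.toList ['/'])
      ((PySem.Chars.splitOn pattern.toList ['/']).length - 1 - i)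
      ((PySem.Chars.splitOn pattern.toList ['/']).length - 1 - j))) ++
  pvYieldPair (pvMtx (PySem.Chars.splitOn pattern.toList ['/']).length
    (fun i j => pvCell (PySem.Chars.splitOn pattern.toList ['/'])
      j ((PySem.Chars.splitOn pattern.toList ['/']).length - 1 - i))) ++
  pvYieldPair (pvMtx (PySem.Chars.splitOn pattern.toList ['/']).length
    (fun i j => pvCell (PySem.Chars.splitOn pattern.toList ['/']) i j))

-- ===== PRECONDITION & SPEC =====
-- Pre_ excludes exactly the inputs where Python A raises IndexError: some row of
-- pattern.split('/') is shorter than the number of rows, so pattern[ii][i] is out of range.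
def Pre_rotate_and_flip (pattern : String) : Prop :=
  ∀ s ∈ PySem.Chars.splitOn pattern.toList ['/'],
    (PySem.Chars.splitOn pattern.toList ['/']).length ≤ s.length
instance (pattern : String) : Decidable (Pre_rotate_and_flip pattern) := by
  unfold Pre_rotate_and_flip; infer_instance
def pvWitness_rotate_and_flip : String := "ab/cd"

def Spec_rotate_and_flip (pattern : String) (out : List String) : Prop := out = rotate_and_flip_alt pattern
instance (pattern : String) (out : List String) : Decidable (Spec_rotate_and_flip pattern out) := by unfold Spec_rotate_and_flip; infer_instance

-- ===== CLAIM (what is proved, stated in full; the proofs are below) =====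
def Claim_equal_rotate_and_flip : Prop := ∀ (pattern : String), Dom_rotate_and_flip pattern → Pre_rotate_and_flip pattern → Spec_rotate_and_flip pattern (rotate_and_flip pattern)

-- ===== LEMMAS AND PROOFS =====

theorem pv_range_rev (n : Nat) :
    (List.range n).reverse = (List.range n).map (fun i => n - 1 - i) := by
  apply List.ext_getElem
  · simp
  · intro k h1 h2
    simp

theorem pv_getD_mtx {n : Nat} {f : Nat → Nat → Char} {r : Nat} (h : r < n) :
    (pvMtx n f).getD r [] = (List.range n).map (f r) := by
  unfold pvMtx
  rw [List.getD_eq_getElem _ _ (by simpa using h)]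
  simp

theorem pv_rotOnce_eq (n : Nat) (p : List (List Char)) :
    pvRotOnce n p = pvMtx n (fun i j => pvCell p (n - 1 - j) i) := by
  unfold pvRotOnce pvMtx pvCell
  rw [pv_range_rev]
  simp [List.map_map, Function.comp]

theorem pv_mtx_congr {n : Nat} {f f' : Nat → Nat → Char}
    (h : ∀ i j, i < n → j < n → f i j = f' i j) : pvMtx n f = pvMtx n f' := by
  unfold pvMtx
  apply List.map_congr_left
  intro i hi
  apply List.map_congr_left
  intro j hj
  exact h i j (List.mem_range.mp hi) (List.mem_range.mp hj)

theorem pv_rotOnce_mtx (n : Nat) (f : Nat → Nat → Char) :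
    pvRotOnce n (pvMtx n f) = pvMtx n (fun i j => f (n - 1 - j) i) := by
  rw [pv_rotOnce_eq]
  apply pv_mtx_congr
  intro i j hi hj
  unfold pvCell
  rw [pv_getD_mtx (by omega)]
  rw [List.getD_eq_getElem _ _ (by simpa using hi)]
  simp

theorem pv_pyRange04 : PySem.List.pyRange 0 4 1 = [0, 1, 2, 3] := by
  rw [PySem.List.pyRange_one_cons (by norm_num), PySem.List.pyRange_one_cons (by norm_num),
      PySem.List.pyRange_one_cons (by norm_num), PySem.List.pyRange_one_cons (by norm_num),
      PySem.List.pyRange_one_eq_nil (by norm_num)]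
  norm_num

-- ===== VERDICT (by name: the statement is the Claim_ definition above) =====
theorem rotate_and_flip_spec : Claim_equal_rotate_and_flip := by
  intro pattern _ _
  unfold Spec_rotate_and_flip rotate_and_flip rotate_and_flip_alt
  rw [pv_pyRange04]
  generalize PySem.Chars.splitOn pattern.toList ['/'] = m
  simp only [List.foldl]
  have h1 : pvRotOnce m.length m
      = pvMtx m.length (fun i j => pvCell m (m.length - 1 - j) i) :=
    pv_rotOnce_eq m.length m
  have h2 : pvRotOnce m.length (pvMtx m.length (fun i j => pvCell m (m.length - 1 - j) i))
      = pvMtx m.length (fun i j => pvCell m (m.length - 1 - i) (m.length - 1 - j)) := by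
    rw [pv_rotOnce_mtx]
  have h3 : pvRotOnce m.length
        (pvMtx m.length (fun i j => pvCell m (m.length - 1 - i) (m.length - 1 - j)))
      = pvMtx m.length (fun i j => pvCell m j (m.length - 1 - i)) := by
    rw [pv_rotOnce_mtx]
    apply pv_mtx_congr
    intro i j hi hj
    have hjj : m.length - 1 - (m.length - 1 - j) = j := by omega
    rw [hjj]
  have h4 : pvRotOnce m.length (pvMtx m.length (fun i j => pvCell m j (m.length - 1 - i)))
      = pvMtx m.length (fun i j => pvCell m i j) := by
    rw [pv_rotOnce_mtx]
    apply pv_mtx_congr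
    intro i j hi hj
    have hjj : m.length - 1 - (m.length - 1 - j) = j := by omega
    rw [hjj]
  simp only [h1, h2, h3, h4, pvYieldPair]
  simp
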